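-- pv_equiv track=rewrite | github.com/michaelkimm/Algorithm-problem-solving-thought-process-re-record | Python/Programmers/CandidateKey.py | solution
-- ===== SOURCE A (Python) =====
-- import itertools
-- import itertools
--
-- def solution(relation):
--     # 8C1 ~ 8C8 = 250
--     # 각 키당 20번씩 검색
--     key_check_list = []
--     for i in range(1, len(relation[0]) + 1):
--         for tuple_k in itertools.combinations(range(len(relation[0])), i):
--             key_check_list.append(set(k for k in tuple_k))
--
--     candidate_keys = []
--     answer = 0
--     for key in key_check_list:
--         available = True
--         # 최소성 확인
--         for ck in candidate_keys:
--             if key.intersection(ck) == ck: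
--                 available = False
--                 break
--         if not available:
--             continue
--
--         # 유일성 확인
--         tmp_set = set()
--         for data in relation:
--             data_piece = tuple(data[k] for k in key)
--             tmp_set.add(data_piece)
--         if len(tmp_set) == len(relation):
--             candidate_keys.append(key)
--             answer += 1
--
--     return answer
-- ===== SOURCE B (Python) =====
-- def solution(relation):
--     n = len(relation[0])
--     m = len(relation)
--     # phase 0: enumerate every column subset by powerset doubling
--     subsets = [[]]
--     for j in range(n):
--         subsets = subsets + [s + [j] for s in subsets]
--     # phase 1: collect every nonempty superkey
--     superkeys = [s for s in subsets
--                  if s and len({tuple(row[j] for j in s) for row in relation}) == m]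
--     # phase 2: a candidate key is a superkey with no proper-subset superkey
--     return sum(1 for s in superkeys
--                if not any(set(t) < set(s) for t in superkeys))
-- ===== Notes on version B (the rewrite author's own statement) =====
-- stated objective: alternative
-- what changed: A enumerates column subsets in size order and does a greedy order-dependent minimality check against the candidate keys found so far; B is a two-phase build-then-filter: it enumerates all subsets by powerset doubling, collects every nonempty superkey, then counts the superkeys with no proper-subset superkey.
import Mathlib
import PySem

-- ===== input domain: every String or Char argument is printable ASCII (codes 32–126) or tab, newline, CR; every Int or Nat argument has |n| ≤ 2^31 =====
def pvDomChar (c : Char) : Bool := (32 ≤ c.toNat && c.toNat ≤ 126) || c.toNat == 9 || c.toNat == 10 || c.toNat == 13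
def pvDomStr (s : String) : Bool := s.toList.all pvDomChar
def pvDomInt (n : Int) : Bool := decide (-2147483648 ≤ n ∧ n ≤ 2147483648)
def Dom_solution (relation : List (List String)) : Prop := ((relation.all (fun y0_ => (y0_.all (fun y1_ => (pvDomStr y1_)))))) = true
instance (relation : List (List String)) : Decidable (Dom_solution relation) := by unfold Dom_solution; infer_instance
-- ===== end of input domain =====

-- B replaces A's order-dependent greedy minimality check with a two-phase
-- "collect all superkeys, then keep the minimal ones" decomposition (objective: alternative).

-- ===== PORT A =====
-- tuple(data[k] for k in key): key is a Python set built from an ascending combination and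
-- iterated in one fixed order per key; the distinct-projection COUNT below does not depend
-- on that order, so projecting in the set's insertion (ascending) order is exact.
def pvProj (key : List Int) (data : List String) : List (Option String) :=
  key.map (fun k => PySem.List.pyGet? data k)

def pvStepA (relation : List (List String)) (st : List (List Int) × Int)
    (key : List Int) : List (List Int) × Int :=
  if st.1.any (fun ck => PySem.Set.equal (PySem.Set.inter key ck) ck) then st
  else
    let tmp : PySem.Set (List (Option String)) :=
      relation.foldl (fun s data => PySem.Set.add s (pvProj key data)) PySem.Set.empty
    if PySem.Set.len tmp = (relation.length : Int) then (st.1 ++ [key], st.2 + 1) else st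

def solution (relation : List (List String)) : Int :=
  let n : Int := ((PySem.List.pyGetD relation 0 []).length : Int)   -- len(relation[0]); IndexError on [] is excluded by Pre_
  let keyCheckList : List (List Int) :=
    (PySem.List.pyRange 1 (n + 1)).foldl
      (fun acc i =>
        acc ++ (PySem.List.combinations (PySem.List.pyRange 0 n) i.toNat).map
          (fun t => PySem.Set.ofList t)) []
  (keyCheckList.foldl (pvStepA relation) ([], 0)).2

-- ===== PORT B =====
def pvProjB (s : List Int) (row : List String) : List (Option String) :=
  s.map (fun j => PySem.List.pyGet? row j)

-- set(t) < set(s): proper subset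
def pvProperSub (t s : List Int) : Bool :=
  PySem.Set.issubset (PySem.Set.ofList t) (PySem.Set.ofList s) &&
    !(PySem.Set.equal (PySem.Set.ofList t) (PySem.Set.ofList s))

def solution_alt (relation : List (List String)) : Int :=
  let n : Int := ((PySem.List.pyGetD relation 0 []).length : Int)
  let m : Int := (relation.length : Int)
  -- phase 0: every column subset, by powerset doubling
  let subsets : List (List Int) :=
    (PySem.List.pyRange 0 n).foldl (fun ss j => ss ++ ss.map (fun s => s ++ [j])) [[]]
  -- phase 1: every nonempty superkey
  let superkeys : List (List Int) :=
    subsets.filter (fun s =>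
      !s.isEmpty &&
        PySem.Set.len (PySem.Set.ofList (relation.map (fun row => pvProjB s row))) == m)
  -- phase 2: count superkeys having no proper-subset superkey
  superkeys.foldl
    (fun a s => if superkeys.any (fun t => pvProperSub t s) then a else a + 1) 0

-- ===== PRECONDITION & SPEC =====
-- Pre_ excludes exactly the inputs where Python A raises IndexError: the empty relation
-- (relation[0]) and relations where some row is shorter than the first row (data[k]).
def Pre_solution (relation : List (List String)) : Prop :=
  relation ≠ [] ∧ ∀ row ∈ relation, relation.headI.length ≤ row.length
instance (relation : List (List String)) : Decidable (Pre_solution relation) := by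
  unfold Pre_solution; infer_instance

def pvWitness_solution : List (List String) := [["a", "x"], ["a", "y"]]

def Spec_solution (relation : List (List String)) (out : Int) : Prop := out = solution_alt relation
instance (relation : List (List String)) (out : Int) : Decidable (Spec_solution relation out) := by
  unfold Spec_solution; infer_instance

-- ===== CLAIM (what is proved, stated in full; the proofs are below) =====
def Claim_equal_solution : Prop := ∀ (relation : List (List String)), Dom_solution relation → Pre_solution relation → Spec_solution relation (solution relation)

-- ===== LEMMAS AND PROOFS =====

-- abstract notions shared by the two counts
def pvSK (relation : List (List String)) (c : List Int) : Prop :=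
  (relation.map (fun d => pvProj c d)).Nodup

def pvMin (relation : List (List String)) (c : List Int) : Prop :=
  pvSK relation c ∧ ∀ t ∈ c.sublists, t ≠ [] → t ≠ c → ¬ pvSK relation t

def pvSKb (relation : List (List String)) (c : List Int) : Bool :=
  decide ((relation.map (fun d => pvProj c d)).Nodup)

def pvMinB (relation : List (List String)) (c : List Int) : Bool :=
  pvSKb relation c &&
    c.sublists.all (fun t => t.isEmpty || t == c || !pvSKb relation t)

lemma pvSKb_iff (relation : List (List String)) (c : List Int) :
    pvSKb relation c = true ↔ pvSK relation c := by
  simp [pvSKb, pvSK]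

lemma pvMinB_iff (relation : List (List String)) (c : List Int) :
    pvMinB relation c = true ↔ pvMin relation c := by
  simp only [pvMinB, pvMin, Bool.and_eq_true, List.all_eq_true, pvSKb_iff]
  constructor
  · rintro ⟨h1, h2⟩
    refine ⟨h1, fun t ht htne htc => ?_⟩
    have := h2 t ht
    simp [htc, List.isEmpty_iff, htne] at this
    rw [← pvSKb_iff]
    simp [this]
  · rintro ⟨h1, h2⟩
    refine ⟨h1, fun t ht => ?_⟩
    by_cases he : t = []
    · simp [he]
    by_cases hc : t = c
    · simp [hc]
    simp [he, hc, List.isEmpty_iff]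
    rw [Bool.eq_false_iff]
    intro h
    exact h2 t ht he hc (pvSKb_iff relation t |>.mp h)

def pvKeyList (n : Int) : List (List Int) :=
  (PySem.List.pyRange 1 (n + 1)).flatMap
    (fun i => PySem.List.combinations (PySem.List.pyRange 0 n) i.toNat)

-- ofList length = length ↔ Nodup
lemma pvFoldlAddSublist {α : Type} [BEq α] :
    ∀ (l : List α) (s : PySem.Set α), (l.foldl PySem.Set.add s).Sublist (s ++ l) := by
  intro l
  induction l with
  | nil => intro s; simp
  | cons x l ih =>
    intro s
    simp only [List.foldl_cons]
    refine (ih (s.add x)).trans ?_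
    by_cases h : List.contains s x
    · have hx : PySem.Set.add s x = s := by simp [PySem.Set.add, PySem.Set.contains, h]
      rw [hx]
      exact (List.sublist_cons_self x l).append_left s
    · have hx : PySem.Set.add s x = s ++ [x] := by simp [PySem.Set.add, PySem.Set.contains, h]
      rw [hx]
      simp

lemma pvLenOfList {α : Type} [BEq α] [LawfulBEq α] (l : List α) :
    (PySem.Set.ofList l).length = l.length ↔ l.Nodup := by
  constructor
  · intro h
    have hs : (PySem.Set.ofList l).Sublist l := by
      rw [PySem.Set.ofList_eq_foldl]
      simpa using pvFoldlAddSublist l ([] : PySem.Set α)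
    have := hs.eq_of_length h
    rw [← this]
    exact PySem.Set.nodup_ofList l
  · intro h
    rw [PySem.Set.ofList_eq_self_of_nodup l h]

-- A's uniqueness test computes pvSK
lemma pvSKboolA (relation : List (List String)) (key : List Int) :
    (PySem.Set.len (relation.foldl (fun s data => PySem.Set.add s (pvProj key data))
      PySem.Set.empty) = (relation.length : Int)) ↔ pvSK relation key := by
  have h1 : relation.foldl (fun s data => PySem.Set.add s (pvProj key data)) PySem.Set.empty
      = PySem.Set.ofList (relation.map (fun d => pvProj key d)) := by
    rw [PySem.Set.ofList_eq_foldl, List.foldl_map]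
    rfl
  rw [h1, PySem.Set.len_eq]
  unfold pvSK
  constructor
  · intro h
    have h2 : (PySem.Set.ofList (relation.map (fun d => pvProj key d))).length
        = (relation.map (fun d => pvProj key d)).length := by
      simpa using h
    exact (pvLenOfList _).mp h2
  · intro h
    have := (pvLenOfList _).mpr h
    simp [this]

-- B's uniqueness test computes pvSK
lemma pvSKboolB (relation : List (List String)) (s : List Int) :
    (PySem.Set.len (PySem.Set.ofList (relation.map (fun row => pvProjB s row)))
      == (relation.length : Int)) = true ↔ pvSK relation s := by
  rw [beq_iff_eq, PySem.Set.len_eq]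
  have hp : (fun row => pvProjB s row) = (fun d => pvProj s d) := rfl
  rw [hp]
  unfold pvSK
  constructor
  · intro h
    have h2 : (PySem.Set.ofList (relation.map (fun d => pvProj s d))).length
        = (relation.map (fun d => pvProj s d)).length := by
      simpa using h
    exact (pvLenOfList _).mp h2
  · intro h
    have := (pvLenOfList _).mpr h
    simp [this]

-- every nonempty superkey contains a nonempty minimal superkey
lemma pvMin_exists (relation : List (List String)) :
    ∀ (N : Nat) (c : List Int), c.length ≤ N → c ≠ [] → pvSK relation c →
      ∃ m, m.Sublist c ∧ m ≠ [] ∧ pvMin relation m := by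
  intro N
  induction N with
  | zero => intro c hc hne _; cases c <;> simp_all
  | succ N ih =>
    intro c hc hne hsk
    by_cases hm : pvMin relation c
    · exact ⟨c, List.Sublist.refl c, hne, hm⟩
    · unfold pvMin at hm
      push Not at hm
      obtain ⟨t, ht, htne, htc, htsk⟩ := hm hsk
      have hts : t.Sublist c := List.mem_sublists.mp ht
      have hlt : t.length < c.length := by
        rcases Nat.lt_or_ge t.length c.length with h | h
        · exact h
        · exact absurd (hts.eq_of_length (le_antisymm hts.length_le h)) htc
      obtain ⟨m, hm1, hm2, hm3⟩ := ih t (by omega) htne htsk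
      exact ⟨m, hm1.trans hts, hm2, hm3⟩

-- strictly sorted lists: subset implies sublist
lemma pvChainSub {s t : List Int} (hs : s.Pairwise (· < ·)) (ht : t.Pairwise (· < ·))
    (h : s ⊆ t) : s.Sublist t :=
  List.sublist_of_subperm_of_pairwise (List.Nodup.subperm (List.Pairwise.imp ne_of_lt hs) h) hs ht

lemma pvSublistSorted {c : List Int} (n : Int) (h : c.Sublist (PySem.List.pyRange 0 n)) :
    c.Pairwise (· < ·) :=
  List.Pairwise.sublist h (PySem.List.pairwise_lt_pyRange_one 0 n)

lemma pvSublistNodup {c : List Int} (n : Int) (h : c.Sublist (PySem.List.pyRange 0 n)) :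
    c.Nodup :=
  (pvSublistSorted n h).imp ne_of_lt

-- A's set-membership test: intersection equals ck ↔ ck ⊆ key
lemma pvInterBool (key ck : List Int) :
    PySem.Set.equal (PySem.Set.inter key ck) ck = true ↔ ∀ x ∈ ck, x ∈ key := by
  rw [PySem.Set.equal_iff]
  constructor
  · intro h x hx
    exact ((PySem.Set.mem_inter key ck x).mp ((h x).mpr hx)).1
  · intro h x
    rw [PySem.Set.mem_inter]
    exact ⟨fun hx => hx.2, fun hx => ⟨h x hx, hx⟩⟩

-- combinations of a nodup list are nodup
lemma pvNodupCombinations {α : Type} :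
    ∀ (xs : List α), xs.Nodup → ∀ r, (PySem.List.combinations xs r).Nodup := by
  intro xs
  induction xs with
  | nil =>
    intro _ r
    cases r <;> simp [PySem.List.combinations_zero, PySem.List.combinations_nil_succ]
  | cons x xs ih =>
    intro hnd r
    have hx : x ∉ xs := (List.nodup_cons.mp hnd).1
    have hxs : xs.Nodup := (List.nodup_cons.mp hnd).2
    cases r with
    | zero => simp [PySem.List.combinations_zero]
    | succ r =>
      rw [PySem.List.combinations_cons_succ, List.nodup_append]
      refine ⟨(ih hxs r).map (fun a b h => by injection h), ih hxs (r + 1), ?_⟩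
      intro a ha b hb
      obtain ⟨a', _, rfl⟩ := List.mem_map.mp ha
      rintro rfl
      have hsl := ((PySem.List.mem_combinations_iff _ _ _).mp hb).1
      exact hx (hsl.subset (by simp))

-- grouped flatMap: nodup + sorted-by-length
lemma pvGrouped (l : List Int) (f : Int → List (List Int)) :
    l.Pairwise (· < ·) →
    (∀ i ∈ l, ∀ c ∈ f i, (c.length : Int) = i) →
    (∀ i ∈ l, (f i).Nodup) →
    (l.flatMap f).Nodup ∧ (l.flatMap f).Pairwise (fun c d => c.length ≤ d.length) := by
  induction l with
  | nil => intro _ _ _; simp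
  | cons i l ih =>
    intro hp hlen hnd
    rw [List.pairwise_cons] at hp
    obtain ⟨hil, hpl⟩ := hp
    obtain ⟨ihn, ihp⟩ := ih hpl (fun j hj c hc => hlen j (by simp [hj]) c hc)
      (fun j hj => hnd j (by simp [hj]))
    rw [List.flatMap_cons]
    constructor
    · rw [List.nodup_append]
      refine ⟨hnd i (by simp), ihn, ?_⟩
      intro a ha b hb
      obtain ⟨j, hj, hbj⟩ := List.mem_flatMap.mp hb
      rintro rfl
      have h1 := hlen i (by simp) a ha
      have h2 := hlen j (by simp [hj]) a hbj
      have h3 := hil j hj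
      omega
    · rw [List.pairwise_append]
      refine ⟨?_, ihp, ?_⟩
      · apply List.pairwise_of_forall_mem_list
        intro a ha b hb
        have h1 := hlen i (by simp) a ha
        have h2 := hlen i (by simp) b hb
        omega
      · intro a ha b hb
        obtain ⟨j, hj, hbj⟩ := List.mem_flatMap.mp hb
        have h1 := hlen i (by simp) a ha
        have h2 := hlen j (by simp [hj]) b hbj
        have h3 := hil j hj
        omega

lemma pvMemKeyList (n : Int) (hn : 0 ≤ n) (c : List Int) :
    c ∈ pvKeyList n ↔ c.Sublist (PySem.List.pyRange 0 n) ∧ c ≠ [] := by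
  unfold pvKeyList
  rw [List.mem_flatMap]
  constructor
  · rintro ⟨i, hi, hc⟩
    rw [PySem.List.mem_pyRange_one] at hi
    obtain ⟨hsub, hlen⟩ := (PySem.List.mem_combinations_iff _ _ _).mp hc
    refine ⟨hsub, ?_⟩
    rintro rfl
    simp at hlen
    omega
  · rintro ⟨hsub, hne⟩
    refine ⟨(c.length : Int), ?_, ?_⟩
    · rw [PySem.List.mem_pyRange_one]
      have h1 : 1 ≤ c.length := Nat.one_le_iff_ne_zero.mpr (by simpa using hne)
      have h2 : c.length ≤ (PySem.List.pyRange 0 n).length := hsub.length_le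
      rw [PySem.List.length_pyRange_one] at h2
      omega
    · rw [PySem.List.mem_combinations_iff]
      exact ⟨hsub, by simp⟩

lemma pvKeyListNodup (n : Int) :
    (pvKeyList n).Nodup ∧ (pvKeyList n).Pairwise (fun c d => c.length ≤ d.length) := by
  unfold pvKeyList
  apply pvGrouped
  · exact PySem.List.pairwise_lt_pyRange_one 1 (n + 1)
  · intro i hi c hc
    rw [PySem.List.mem_pyRange_one] at hi
    have := ((PySem.List.mem_combinations_iff _ _ _).mp hc).2
    omega
  · intro i _
    exact pvNodupCombinations _ (PySem.List.nodup_pyRange_one 0 n) _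

-- A unfolds to a fold of pvStepA over pvKeyList
lemma pvSolutionEq (relation : List (List String)) :
    solution relation =
      ((pvKeyList ((PySem.List.pyGetD relation 0 []).length : Int)).foldl
        (pvStepA relation) ([], 0)).2 := by
  show ((List.foldl
      (fun acc i =>
        acc ++ (PySem.List.combinations (PySem.List.pyRange 0 ((PySem.List.pyGetD relation 0 []).length : Int)) i.toNat).map
          (fun t => PySem.Set.ofList t))
      [] (PySem.List.pyRange 1 (((PySem.List.pyGetD relation 0 []).length : Int) + 1))).foldl
      (pvStepA relation) ([], 0)).2 = _
  rw [PySem.List.foldl_append_eq_flatMap]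
  rw [List.nil_append]
  unfold pvKeyList
  refine congrArg (fun L => (List.foldl (pvStepA relation) ([], 0) L).2) ?_
  apply List.flatMap_congr
  intro i _
  refine (List.map_congr_left ?_).trans (List.map_id _)
  intro t ht
  exact PySem.Set.ofList_eq_self_of_nodup t
    (pvSublistNodup _ ((PySem.List.mem_combinations_iff _ _ _).mp ht).1)

-- one step of A's loop, in closed form
lemma pvStepA_eq (relation : List (List String)) (C : List (List Int)) (a : Int) (key : List Int) :
    pvStepA relation (C, a) key =
      if C.any (fun ck => PySem.Set.equal (PySem.Set.inter key ck) ck) then (C, a)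
      else if pvSKb relation key then (C ++ [key], a + 1) else (C, a) := by
  unfold pvStepA
  by_cases h : C.any (fun ck => PySem.Set.equal (PySem.Set.inter key ck) ck)
  · simp [h]
  · simp only [h, Bool.false_eq_true, if_false]
    by_cases h2 : pvSKb relation key = true
    · rw [if_pos ((pvSKboolA relation key).mpr ((pvSKb_iff relation key).mp h2)), h2, if_pos rfl]
    · rw [if_neg (fun hc => h2 ((pvSKb_iff relation key).mpr ((pvSKboolA relation key).mp hc)))]
      simp only [Bool.eq_false_iff.mpr h2, Bool.false_eq_true, if_false]

-- the greedy acceptance test is exactly minimality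
lemma pvAccept (relation : List (List String)) (n : Int) (P : List (List Int)) (key : List Int)
    (hkey : key.Sublist (PySem.List.pyRange 0 n)) (_hne : key ≠ []) (hnotP : key ∉ P)
    (hP : ∀ c ∈ P, c.Sublist (PySem.List.pyRange 0 n) ∧ c ≠ [])
    (hclo : ∀ t, t.Sublist key → t ≠ [] → t.length < key.length → t ∈ P) :
    (((P.filter (pvMinB relation)).any
        (fun ck => PySem.Set.equal (PySem.Set.inter key ck) ck) = false) ∧ pvSK relation key)
      ↔ pvMin relation key := by
  constructor
  · rintro ⟨hany, hsk⟩
    refine ⟨hsk, ?_⟩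
    intro t ht htne htkey hskt
    have htsl : t.Sublist key := List.mem_sublists.mp ht
    have hlt : t.length < key.length :=
      lt_of_le_of_ne htsl.length_le (fun h => htkey (htsl.eq_of_length h))
    obtain ⟨m, hm1, hm2, hm3⟩ := pvMin_exists relation t.length t (le_refl _) htne hskt
    have hmlen := hm1.length_le
    have hmP : m ∈ P := hclo m (hm1.trans htsl) hm2 (by omega)
    rw [List.any_eq_false] at hany
    have hne := hany m (List.mem_filter.mpr ⟨hmP, (pvMinB_iff relation m).mpr hm3⟩)
    exact hne ((pvInterBool key m).mpr (fun x hx => (hm1.trans htsl).subset hx))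
  · intro hmin
    refine ⟨?_, hmin.1⟩
    rw [List.any_eq_false]
    intro ck hck
    rw [List.mem_filter] at hck
    obtain ⟨hckP, hckmin'⟩ := hck
    have hckmin := (pvMinB_iff relation ck).mp hckmin'
    intro hEq
    have hsub : ∀ x ∈ ck, x ∈ key := (pvInterBool key ck).mp hEq
    obtain ⟨hckR, hckne⟩ := hP ck hckP
    have hcks : ck.Sublist key :=
      pvChainSub (pvSublistSorted n hckR) (pvSublistSorted n hkey) hsub
    have hckkey : ck ≠ key := fun h => hnotP (h ▸ hckP)
    exact hmin.2 ck (List.mem_sublists.mpr hcks) hckne hckkey hckmin.1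

-- the greedy loop counts minimal superkeys
lemma pvGreedy (relation : List (List String)) (n : Int) :
    ∀ (L P : List (List Int)) (a : Int),
      (∀ c ∈ P ++ L, c.Sublist (PySem.List.pyRange 0 n) ∧ c ≠ []) →
      (P ++ L).Nodup →
      (∀ c ∈ L, ∀ t, t.Sublist c → t ≠ [] → t.length < c.length → t ∈ P ∨ t ∈ L) →
      L.Pairwise (fun c d => c.length ≤ d.length) →
      L.foldl (pvStepA relation) (P.filter (pvMinB relation), a)
        = ((P ++ L).filter (pvMinB relation), a + (L.countP (pvMinB relation) : Int)) := by
  intro L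
  induction L with
  | nil => intro P a _ _ _ _; simp
  | cons key L ih =>
    intro P a hall hnd hclo hpair
    rw [List.foldl_cons, pvStepA_eq]
    obtain ⟨hkeyR, hkeyne⟩ := hall key (by simp)
    have hnotP : key ∉ P := by
      rw [List.nodup_append] at hnd
      intro hmem
      exact hnd.2.2 key hmem key (by simp) rfl
    have hclo' : ∀ t, t.Sublist key → t ≠ [] → t.length < key.length → t ∈ P := by
      intro t h1 h2 h3
      rcases hclo key (by simp) t h1 h2 h3 with h | h
      · exact h
      · rcases List.mem_cons.mp h with rfl | h
        · omega
        · have := (List.pairwise_cons.mp hpair).1 t h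
          omega
    have hacc := pvAccept relation n P key hkeyR hkeyne hnotP
      (fun c hc => hall c (by simp [hc])) hclo'
    have hih := fun (a' : Int) => ih (P ++ [key]) a'
      (by intro c hc; apply hall; rw [List.append_cons]; exact hc)
      (by rw [← List.append_cons]; exact hnd)
      (by
        intro c hc t h1 h2 h3
        rcases hclo c (by simp [hc]) t h1 h2 h3 with h | h
        · exact Or.inl (by simp [h])
        · rcases List.mem_cons.mp h with rfl | h
          · exact Or.inl (by simp)
          · exact Or.inr h)
      (List.pairwise_cons.mp hpair).2
    by_cases hA : (P.filter (pvMinB relation)).any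
        (fun ck => PySem.Set.equal (PySem.Set.inter key ck) ck)
    · rw [if_pos hA]
      have hmf : pvMinB relation key = false := by
        rw [Bool.eq_false_iff]
        intro hmt
        have h0 := (hacc.mpr ((pvMinB_iff _ _).mp hmt)).1
        rw [h0] at hA
        exact Bool.false_ne_true hA
      have hfil : (P ++ [key]).filter (pvMinB relation) = P.filter (pvMinB relation) := by
        rw [List.filter_append]
        simp [hmf]
      rw [← hfil, hih a, List.append_cons P key L, List.countP_cons]
      simp [hmf]
    · rw [if_neg hA]
      have hAf : (P.filter (pvMinB relation)).any
          (fun ck => PySem.Set.equal (PySem.Set.inter key ck) ck) = false :=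
        Bool.eq_false_iff.mpr hA
      by_cases hS : pvSKb relation key = true
      · rw [hS, if_pos rfl]
        have hmt : pvMinB relation key = true :=
          (pvMinB_iff _ _).mpr (hacc.mp ⟨hAf, (pvSKb_iff relation key).mp hS⟩)
        have hfil2 : (P ++ [key]).filter (pvMinB relation)
            = P.filter (pvMinB relation) ++ [key] := by
          rw [List.filter_append]
          simp [hmt]
        rw [show (P.filter (pvMinB relation) ++ [key], a + 1)
            = ((P ++ [key]).filter (pvMinB relation), a + 1) from by rw [hfil2]]
        rw [hih (a + 1), List.append_cons P key L, List.countP_cons]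
        rw [Prod.mk.injEq]
        refine ⟨rfl, ?_⟩
        simp [hmt]
        ring
      · simp only [Bool.eq_false_iff.mpr hS, Bool.false_eq_true, if_false]
        have hmf : pvMinB relation key = false := by
          rw [Bool.eq_false_iff]
          intro hmt
          exact hS ((pvSKb_iff relation key).mpr ((pvMinB_iff _ _).mp hmt).1)
        have hfil : (P ++ [key]).filter (pvMinB relation) = P.filter (pvMinB relation) := by
          rw [List.filter_append]
          simp [hmf]
        rw [← hfil, hih a, List.append_cons P key L, List.countP_cons]
        simp [hmf]

-- B's subset enumeration is List.sublists of the range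
lemma pvSubsetsEq : ∀ (N : Nat),
    (PySem.List.pyRange 0 (N : Int)).foldl
        (fun ss j => ss ++ ss.map (fun s => s ++ [j])) [[]]
      = (PySem.List.pyRange 0 (N : Int)).sublists := by
  intro N
  induction N with
  | zero => simp [PySem.List.pyRange_one_eq_nil (le_refl (0 : Int))]
  | succ N ih =>
    have hcast : ((N + 1 : Nat) : Int) = (N : Int) + 1 := by push_cast; ring
    rw [hcast, PySem.List.pyRange_one_succ_right (by positivity)]
    rw [List.foldl_append, List.foldl_cons, List.foldl_nil, ih, List.sublists_concat]

-- B's superkey filter predicate and superkey list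
def pvQ (relation : List (List String)) : List Int → Bool := fun s =>
  !s.isEmpty &&
    PySem.Set.len (PySem.Set.ofList (relation.map (fun row => pvProjB s row)))
      == (relation.length : Int)

def pvSup (relation : List (List String)) : List (List Int) :=
  ((PySem.List.pyRange 0 ((PySem.List.pyGetD relation 0 []).length : Int)).foldl
      (fun ss j => ss ++ ss.map (fun s => s ++ [j])) [[]]).filter (pvQ relation)

lemma pvQ_iff (relation : List (List String)) (s : List Int) :
    pvQ relation s = true ↔ s ≠ [] ∧ pvSK relation s := by
  unfold pvQ
  rw [Bool.and_eq_true, pvSKboolB]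
  simp

-- B's inner any-test refutes minimality (for a nonempty superkey sublist of the range)
lemma pvAnyProper (relation : List (List String)) (n : Int) (s : List Int)
    (hs : s.Sublist (PySem.List.pyRange 0 n)) (hne : s ≠ []) (hsk : pvSK relation s) :
    (((PySem.List.pyRange 0 n).sublists.filter (pvQ relation)).any
        (fun t => pvProperSub t s) = true)
      ↔ ¬ (∀ t ∈ s.sublists, t ≠ [] → t ≠ s → ¬ pvSK relation t) := by
  rw [List.any_eq_true]
  constructor
  · rintro ⟨t, htmem, hts⟩
    rw [List.mem_filter] at htmem
    obtain ⟨htsub', hq⟩ := htmem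
    have htsub : t.Sublist (PySem.List.pyRange 0 n) := List.mem_sublists.mp htsub'
    obtain ⟨htne, htsk⟩ := (pvQ_iff relation t).mp hq
    unfold pvProperSub at hts
    rw [Bool.and_eq_true, PySem.Set.issubset_iff] at hts
    have hsub : ∀ x ∈ t, x ∈ s := by
      intro x hx
      have := hts.1 x (by rw [PySem.Set.mem_ofList]; exact hx)
      rwa [PySem.Set.mem_ofList] at this
    have hneq : t ≠ s := by
      rintro rfl
      have : PySem.Set.equal (PySem.Set.ofList t) (PySem.Set.ofList t) = true := by
        rw [PySem.Set.equal_iff]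
        intro x
        exact Iff.rfl
      rw [this] at hts
      exact Bool.false_ne_true hts.2
    have htsl : t.Sublist s := pvChainSub (pvSublistSorted n htsub) (pvSublistSorted n hs) hsub
    intro hall
    exact hall t (List.mem_sublists.mpr htsl) htne hneq htsk
  · intro hnall
    push Not at hnall
    obtain ⟨t, ht, htne, htsne, htsk⟩ := hnall
    have htsl : t.Sublist s := List.mem_sublists.mp ht
    refine ⟨t, ?_, ?_⟩
    · rw [List.mem_filter]
      exact ⟨List.mem_sublists.mpr (htsl.trans hs), (pvQ_iff relation t).mpr ⟨htne, htsk⟩⟩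
    · unfold pvProperSub
      rw [Bool.and_eq_true, PySem.Set.issubset_iff]
      refine ⟨?_, ?_⟩
      · intro x hx
        rw [PySem.Set.mem_ofList] at hx ⊢
        exact htsl.subset hx
      · rw [Bool.not_eq_eq_eq_not, Bool.not_true, Bool.eq_false_iff]
        intro heq
        rw [PySem.Set.equal_iff] at heq
        have hsub2 : ∀ x ∈ s, x ∈ t := by
          intro x hx
          have := (heq x).mpr (by rw [PySem.Set.mem_ofList]; exact hx)
          rwa [PySem.Set.mem_ofList] at this
        have hstl : s.Sublist t :=
          pvChainSub (pvSublistSorted n hs) (pvSublistSorted n (htsl.trans hs)) hsub2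
        exact htsne (htsl.antisymm hstl)

-- B counts minimal superkeys
lemma pvAltEq (relation : List (List String)) :
    solution_alt relation =
      (((PySem.List.pyRange 0 ((PySem.List.pyGetD relation 0 []).length : Int)).sublists).countP
        (fun s => !s.isEmpty && pvMinB relation s) : Int) := by
  show (pvSup relation).foldl
      (fun a s => if (pvSup relation).any (fun t => pvProperSub t s) then a else a + 1) 0 = _
  have hsup : pvSup relation
      = ((PySem.List.pyRange 0 ((PySem.List.pyGetD relation 0 []).length : Int)).sublists).filter
          (pvQ relation) := by
    unfold pvSup
    rw [pvSubsetsEq]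
  have hfn : (fun (a : Int) s => if (pvSup relation).any (fun t => pvProperSub t s) then a else a + 1)
      = (fun (a : Int) s =>
          if (!(pvSup relation).any (fun t => pvProperSub t s)) = true then a + 1 else a) := by
    funext a s
    cases h : (pvSup relation).any (fun t => pvProperSub t s) <;> simp
  rw [hfn, hsup, PySem.List.foldl_count_if, List.countP_filter, zero_add]
  congr 1
  apply List.countP_congr
  intro x hx
  have hxsub : x.Sublist (PySem.List.pyRange 0 ((PySem.List.pyGetD relation 0 []).length : Int)) :=
    List.mem_sublists.mp hx
  rw [Bool.and_eq_true, Bool.and_eq_true, Bool.not_eq_eq_eq_not, Bool.not_true, pvQ_iff]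
  constructor
  · rintro ⟨hany, hne, hsk⟩
    have hmp : ∀ t ∈ x.sublists, t ≠ [] → t ≠ x → ¬ pvSK relation t := by
      by_contra hc
      exact Bool.false_ne_true (hany ▸ (pvAnyProper relation _ x hxsub hne hsk).mpr hc)
    exact ⟨by simpa [List.isEmpty_iff] using hne, (pvMinB_iff relation x).mpr ⟨hsk, hmp⟩⟩
  · rintro ⟨hne', hmb⟩
    have hne : x ≠ [] := by simpa [List.isEmpty_iff] using hne'
    obtain ⟨hsk, hmp⟩ := (pvMinB_iff relation x).mp hmb
    refine ⟨?_, hne, hsk⟩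
    rw [Bool.eq_false_iff]
    intro hany
    exact (pvAnyProper relation _ x hxsub hne hsk).mp hany hmp

-- A counts minimal superkeys too
lemma pvAEq (relation : List (List String)) :
    solution relation =
      (((PySem.List.pyRange 0 ((PySem.List.pyGetD relation 0 []).length : Int)).sublists).countP
        (fun s => !s.isEmpty && pvMinB relation s) : Int) := by
  rw [pvSolutionEq]
  have hn : (0 : Int) ≤ ((PySem.List.pyGetD relation 0 []).length : Int) := Int.natCast_nonneg _
  obtain ⟨hnd, hpair⟩ := pvKeyListNodup ((PySem.List.pyGetD relation 0 []).length : Int)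
  have hmem := pvMemKeyList ((PySem.List.pyGetD relation 0 []).length : Int) hn
  have hg := pvGreedy relation ((PySem.List.pyGetD relation 0 []).length : Int)
    (pvKeyList ((PySem.List.pyGetD relation 0 []).length : Int)) [] 0
    (by
      intro c hc
      rw [List.nil_append] at hc
      exact (hmem c).mp hc)
    (by rw [List.nil_append]; exact hnd)
    (by
      intro c hc t h1 h2 h3
      refine Or.inr ((hmem t).mpr ⟨h1.trans ((hmem c).mp hc).1, h2⟩))
    hpair
  rw [List.filter_nil] at hg
  rw [hg, List.nil_append, zero_add]
  have hperm : (pvKeyList ((PySem.List.pyGetD relation 0 []).length : Int)).Perm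
      (((PySem.List.pyRange 0 ((PySem.List.pyGetD relation 0 []).length : Int)).sublists).filter
        (fun s => !s.isEmpty)) := by
    rw [List.perm_ext_iff_of_nodup hnd
      ((List.nodup_sublists.mpr (PySem.List.nodup_pyRange_one 0 _)).filter _)]
    intro c
    rw [hmem c, List.mem_filter, List.mem_sublists]
    simp
  rw [List.Perm.countP_eq _ hperm, List.countP_filter]
  show ((List.countP (fun a => pvMinB relation a && !a.isEmpty)
      ((PySem.List.pyRange 0 ((PySem.List.pyGetD relation 0 []).length : Int)).sublists) : Nat) : Int)
    = _
  congr 1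
  apply List.countP_congr
  intro x _
  rw [Bool.and_eq_true, Bool.and_eq_true]
  exact and_comm

-- ===== VERDICT (by name: the statement is the Claim_ definition above) =====
theorem solution_spec : Claim_equal_solution := by
  intro relation _ _
  unfold Spec_solution
  rw [pvAEq, pvAltEq]
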